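-- pv_equiv track=rewrite | github.com/palakgupta082006-tech/HospitalOS | smart_agent.py | _guess_diagnosis
-- ===== SOURCE A (Python) =====
-- def _guess_diagnosis(symptoms):
--     symptom_map = {
--         "cardiac_arrest": ["chest pain", "breathlessness", "sweating", "arm pain"],
--         "stroke": ["facial drooping", "arm weakness", "speech difficulty", "confusion"],
--         "appendicitis": ["stomach pain", "fever", "nausea", "loss of appetite"],
--         "pneumonia": ["cough", "fever", "breathing difficulty", "chills"],
--         "dengue": ["high fever", "rash", "joint pain", "headache"],
--         "fracture": ["limb pain", "swelling", "inability to move", "bruising"],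
--         "typhoid": ["prolonged fever", "weakness", "abdominal pain", "rose spots"],
--     }
--
--     best_match = None
--     best_score = -1
--
--     for diagnosis, diag_symptoms in symptom_map.items():
--         score = len(set(symptoms) & set(diag_symptoms))
--         if score > best_score:
--             best_score = score
--             best_match = diagnosis
--
--     return best_match
-- ===== SOURCE B (Python) =====
-- def _guess_diagnosis(symptoms):
--     symptom_map = {
--         "cardiac_arrest": ["chest pain", "breathlessness", "sweating", "arm pain"],
--         "stroke": ["facial drooping", "arm weakness", "speech difficulty", "confusion"],
--         "appendicitis": ["stomach pain", "fever", "nausea", "loss of appetite"],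
--         "pneumonia": ["cough", "fever", "breathing difficulty", "chills"],
--         "dengue": ["high fever", "rash", "joint pain", "headache"],
--         "fracture": ["limb pain", "swelling", "inability to move", "bruising"],
--         "typhoid": ["prolonged fever", "weakness", "abdominal pain", "rose spots"],
--     }
--
--     # inverted index: symptom -> diagnoses that list it
--     index = {}
--     for diagnosis, diag_symptoms in symptom_map.items():
--         for s in diag_symptoms:
--             index.setdefault(s, []).append(diagnosis)
--
--     counts = {d: 0 for d in symptom_map}
--     for s in set(symptoms):
--         for d in index.get(s, ()):
--             counts[d] += 1
--
--     best_match = None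
--     best_score = -1
--     for d in symptom_map:
--         if counts[d] > best_score:
--             best_match = d
--             best_score = counts[d]
--     return best_match
-- ===== Notes on version B (the rewrite author's own statement) =====
-- stated objective: alternative
-- what changed: Replaces the per-diagnosis set-intersection scan with an inverted index (symptom -> diagnoses) and a single counting pass over the deduplicated input, then an argmax scan over precomputed counts.
import Mathlib
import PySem

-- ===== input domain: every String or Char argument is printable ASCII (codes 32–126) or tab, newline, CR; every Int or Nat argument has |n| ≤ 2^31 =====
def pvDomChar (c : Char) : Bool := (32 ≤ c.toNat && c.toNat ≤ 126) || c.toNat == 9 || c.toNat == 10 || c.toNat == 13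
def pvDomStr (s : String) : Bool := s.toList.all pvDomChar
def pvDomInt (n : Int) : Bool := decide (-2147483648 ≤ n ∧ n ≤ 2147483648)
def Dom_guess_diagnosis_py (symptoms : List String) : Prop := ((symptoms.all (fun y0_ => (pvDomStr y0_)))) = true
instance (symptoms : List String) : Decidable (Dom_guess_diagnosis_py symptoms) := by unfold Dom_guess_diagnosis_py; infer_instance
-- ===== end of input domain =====

-- B replaces A's per-diagnosis set intersections with an inverted index (symptom -> diagnoses)
-- and a single counting pass over the deduplicated input (objective: alternative algorithm).

-- ===== PORT A =====
-- the symptom_map dict, as its insertion-ordered (key, value) list (shared literal of both Pythons)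
def pvSymptomMap : List (String × List String) :=
  [("cardiac_arrest", ["chest pain", "breathlessness", "sweating", "arm pain"]),
   ("stroke", ["facial drooping", "arm weakness", "speech difficulty", "confusion"]),
   ("appendicitis", ["stomach pain", "fever", "nausea", "loss of appetite"]),
   ("pneumonia", ["cough", "fever", "breathing difficulty", "chills"]),
   ("dengue", ["high fever", "rash", "joint pain", "headache"]),
   ("fracture", ["limb pain", "swelling", "inability to move", "bruising"]),
   ("typhoid", ["prolonged fever", "weakness", "abdominal pain", "rose spots"])]

-- A: for each diagnosis in map order, score = len(set(symptoms) & set(diag_symptoms));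
-- keep the first strictly improving diagnosis (best_score starts at -1).
-- best_match is always set after the first iteration (score ≥ 0 > -1), so the Option default "" is never used.
def guess_diagnosis_py (symptoms : List String) : String :=
  let res := pvSymptomMap.foldl
    (fun (st : Option String × Int) p =>
      let score : Int := (PySem.Set.len (PySem.Set.inter (PySem.Set.ofList symptoms) (PySem.Set.ofList p.2)) : Int)
      if score > st.2 then (some p.1, score) else st)
    (none, -1)
  res.1.getD ""

-- ===== PORT B =====
-- inverted index: symptom -> diagnoses that list it  (index.setdefault(s, []).append(d) = modify s [] (· ++ [d]))
def pvIndex : PySem.Dict String (List String) :=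
  pvSymptomMap.foldl
    (fun idx p => p.2.foldl (fun idx s => idx.modify s [] (· ++ [p.1])) idx)
    PySem.Dict.empty

-- counts = {d: 0 for d in symptom_map}
def pvZeroCounts : PySem.Dict String Int :=
  pvSymptomMap.foldl (fun c p => c.insert p.1 0) PySem.Dict.empty

-- B: one counting pass over set(symptoms) through the inverted index, then an argmax scan of the counts
def guess_diagnosis_py_alt (symptoms : List String) : String :=
  let counts := (PySem.Set.ofList symptoms).foldl
    (fun c s => (pvIndex.getD s []).foldl (fun c d => c.modify d 0 (· + 1)) c)
    pvZeroCounts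
  let res := pvSymptomMap.foldl
    (fun (st : Option String × Int) p =>
      let sc := counts.getD p.1 0
      if sc > st.2 then (some p.1, sc) else st)
    (none, -1)
  res.1.getD ""

-- ===== PRECONDITION & SPEC =====
def Spec_guess_diagnosis_py (symptoms : List String) (out : String) : Prop := out = guess_diagnosis_py_alt symptoms
instance (symptoms : List String) (out : String) : Decidable (Spec_guess_diagnosis_py symptoms out) := by unfold Spec_guess_diagnosis_py; infer_instance

-- ===== CLAIM (what is proved, stated in full; the proofs are below) =====
def Claim_equal_guess_diagnosis_py : Prop := ∀ (symptoms : List String), Dom_guess_diagnosis_py symptoms → Spec_guess_diagnosis_py symptoms (guess_diagnosis_py symptoms)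

-- ===== LEMMAS AND PROOFS =====

-- the inverted index, evaluated to its literal items
theorem pvIndex_eq : pvIndex =
  PySem.Dict.mk [("chest pain", ["cardiac_arrest"]),
    ("breathlessness", ["cardiac_arrest"]),
    ("sweating", ["cardiac_arrest"]),
    ("arm pain", ["cardiac_arrest"]),
    ("facial drooping", ["stroke"]),
    ("arm weakness", ["stroke"]),
    ("speech difficulty", ["stroke"]),
    ("confusion", ["stroke"]),
    ("stomach pain", ["appendicitis"]),
    ("fever", ["appendicitis", "pneumonia"]),
    ("nausea", ["appendicitis"]),
    ("loss of appetite", ["appendicitis"]),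
    ("cough", ["pneumonia"]),
    ("breathing difficulty", ["pneumonia"]),
    ("chills", ["pneumonia"]),
    ("high fever", ["dengue"]),
    ("rash", ["dengue"]),
    ("joint pain", ["dengue"]),
    ("headache", ["dengue"]),
    ("limb pain", ["fracture"]),
    ("swelling", ["fracture"]),
    ("inability to move", ["fracture"]),
    ("bruising", ["fracture"]),
    ("prolonged fever", ["typhoid"]),
    ("weakness", ["typhoid"]),
    ("abdominal pain", ["typhoid"]),
    ("rose spots", ["typhoid"])] := by decide

-- the 27 distinct symptom strings (the keys of the inverted index), used only by the proofs
def pvAllSymptoms : List String := ["chest pain", "breathlessness", "sweating", "arm pain", "facial drooping", "arm weakness", "speech difficulty", "confusion", "stomach pain", "fever", "nausea", "loss of appetite", "cough", "breathing difficulty", "chills", "high fever", "rash", "joint pain", "headache", "limb pain", "swelling", "inability to move", "bruising", "prolonged fever", "weakness", "abdominal pain", "rose spots"]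

-- for each (d, L) of the map: the index's list at any symptom s mentions d exactly when s ∈ L
theorem pvIndex_count (s d₀ : String) (L : List String) (h : (d₀, L) ∈ pvSymptomMap) :
    (pvIndex.getD s []).count d₀ = if s ∈ L then 1 else 0 := by
  by_cases hk : s ∈ pvAllSymptoms
  · rw [pvSymptomMap] at h
    rw [pvAllSymptoms] at hk
    rw [pvIndex_eq]
    fin_cases h <;> fin_cases hk <;> decide
  · have hgetD : pvIndex.getD s [] = [] := by
      apply PySem.Dict.getD_of_not_contains
      rw [pvIndex_eq]
      rw [PySem.Dict.contains_eq_decide_mem_keys]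
      have : pvIndex.keys = pvAllSymptoms := by rw [pvIndex_eq]; decide
      rw [pvIndex_eq] at this
      rw [this]
      simp [hk]
    have hks : ∀ x ∈ L, x ∈ pvAllSymptoms := by
      rw [pvSymptomMap] at h
      fin_cases h <;> decide
    rw [hgetD]
    rw [if_neg (fun hs => hk (hks s hs))]
    rfl

-- summing the index hits over a list of symptoms counts the members of L
theorem pv_count_flatMap (d₀ : String) (L : List String) (h : (d₀, L) ∈ pvSymptomMap)
    (l : List String) :
    (l.flatMap (fun s => pvIndex.getD s [])).count d₀ = l.countP (fun s => decide (s ∈ L)) := by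
  induction l with
  | nil => simp
  | cons s l ih =>
      rw [List.flatMap_cons, List.count_append, ih, pvIndex_count s d₀ L h, List.countP_cons]
      by_cases hs : s ∈ L <;> simp [hs] <;> omega

-- the counting loop, characterised
theorem pv_counts_getD (l : List String) (c : PySem.Dict String Int) (d₀ : String) :
    (l.foldl (fun c s => (pvIndex.getD s []).foldl (fun c d => c.modify d 0 (· + 1)) c) c).getD d₀ 0
      = c.getD d₀ 0 + ((l.flatMap (fun s => pvIndex.getD s [])).count d₀ : Int) := by
  induction l generalizing c with
  | nil => simp
  | cons s l ih =>
      rw [List.foldl_cons, ih, PySem.Dict.getD_foldl_modify_add_one, List.flatMap_cons,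
        List.count_append]
      push_cast
      ring

-- A's score, characterised (ofList L = L holds for each of the duplicate-free literal symptom lists)
theorem pv_scoreA (S L : List String) (hL : PySem.Set.ofList L = L) :
    (PySem.Set.len (PySem.Set.inter (PySem.Set.ofList S) (PySem.Set.ofList L)) : Int)
      = ((PySem.Set.ofList S).countP (fun s => decide (s ∈ L)) : Int) := by
  rw [hL]
  have h1 : PySem.Set.inter (PySem.Set.ofList S) L
      = (PySem.Set.ofList S).filter (fun x => PySem.Set.contains L x) := rfl
  have h2 : ∀ (x : List String), PySem.Set.len x = x.length := fun _ => rfl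
  have h3 : (fun x => PySem.Set.contains L x) = (fun x : String => decide (x ∈ L)) := by
    funext x; simp [pysem]
  rw [h1, h2, h3, ← List.countP_eq_length_filter]

-- per diagnosis: B's final count equals A's score
theorem pv_case (symptoms : List String) (d₀ : String) (L : List String)
    (hmem : (d₀, L) ∈ pvSymptomMap) (hL : PySem.Set.ofList L = L)
    (hz : pvZeroCounts.getD d₀ 0 = 0) :
    ((PySem.Set.ofList symptoms).foldl
        (fun c s => (pvIndex.getD s []).foldl (fun c d => c.modify d 0 (· + 1)) c)
        pvZeroCounts).getD d₀ 0
      = (PySem.Set.len (PySem.Set.inter (PySem.Set.ofList symptoms) (PySem.Set.ofList L)) : Int) := by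
  rw [pv_counts_getD, hz, pv_count_flatMap d₀ L hmem, pv_scoreA symptoms L hL, zero_add]

theorem pv_main (symptoms : List String) :
    guess_diagnosis_py symptoms = guess_diagnosis_py_alt symptoms := by
  unfold guess_diagnosis_py guess_diagnosis_py_alt
  simp only []
  refine congrArg (fun r : Option String × Int => r.1.getD "")
    (PySem.List.foldl_congr_mem _ _ _ _ ?_)
  intro st p hp
  rw [pvSymptomMap] at hp
  fin_cases hp
  · rw [pv_case symptoms "cardiac_arrest" ["chest pain", "breathlessness", "sweating", "arm pain"] (by decide) (by decide) (by decide)]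
  · rw [pv_case symptoms "stroke" ["facial drooping", "arm weakness", "speech difficulty", "confusion"] (by decide) (by decide) (by decide)]
  · rw [pv_case symptoms "appendicitis" ["stomach pain", "fever", "nausea", "loss of appetite"] (by decide) (by decide) (by decide)]
  · rw [pv_case symptoms "pneumonia" ["cough", "fever", "breathing difficulty", "chills"] (by decide) (by decide) (by decide)]
  · rw [pv_case symptoms "dengue" ["high fever", "rash", "joint pain", "headache"] (by decide) (by decide) (by decide)]
  · rw [pv_case symptoms "fracture" ["limb pain", "swelling", "inability to move", "bruising"] (by decide) (by decide) (by decide)]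
  · rw [pv_case symptoms "typhoid" ["prolonged fever", "weakness", "abdominal pain", "rose spots"] (by decide) (by decide) (by decide)]

-- ===== VERDICT (by name: the statement is the Claim_ definition above) =====
theorem guess_diagnosis_py_spec : Claim_equal_guess_diagnosis_py := by
  intro symptoms _
  unfold Spec_guess_diagnosis_py
  exact pv_main symptoms
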